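-- pv_equiv track=rewrite | github.com/lizcconrad/POGG | src/pogg/semantic_composition/sement_util.py | group_equalities
-- ===== SOURCE A (Python) =====
-- def group_equalities(equalities):
--     """
--     Group equalities from a list of EQs into sets as opposed to individual equalities.
--
--
--     That is, if `'x1' = 'x2'` and `'x2' = 'x3'` create a set `('x1', 'x2', 'x3')` such that they're in an equality "group."
--
--     **Parameters**
--     | Parameter | Type | Description | Example |
--     | --------- | ---- | ------------ | ------ |
--     | `equalities` | `list` | list of variable equalities | `[('x1', 'x2'), ('x2', 'x3')]` |
--
--     **Returns**
--     | Type | Description | Example |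
--     | ---- | ----------- | ------- |
--     | list of sets | list of sets of equalities | `[{'x1', 'x2', 'x3'}]` |
--     """
--
--     """
--     Example list of EQs prior to overwrite algorithm: ((x1, x2), (x3, x4), (x1, x4), (x5, x6))
--
--     Assume sets have already been created from the first two equalities, i.e. (x1, x2) and (x3, x4)
--
--     Algorithm proceeds as follows:
--         1. pop  eq off the list -- (x1, x4)
--         2. look through the already created sets to see if either member of the equality is found in existing sets
--             (x1, x2) -- yes, x1 is a member
--             (x3, x4) -- yes, x4 is a member
--         3. Add all the sets that contained either member of the current eq
--         4. Remove those sets from the list and create a new set that is the union of all those sets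
--
--     If none of the sets in the list had either of the eq members, create a new set and add it to the list to be checked
--     against for future eqs
--
--     Result from this example: ({x1, x2, x3, x4}, {x5, x6})
--     """
--
--     equality_sets = []
--     # as long as there are eqs still not covered
--     eqs = equalities.copy()
--     while eqs:
--         # pop one eq off the list
--         current_eq = eqs.pop()
--         # convert to set from tuple
--         current_eq = set(current_eq)
--         # flag for whether a new group is needed
--         need_new = True
--
--         # which already created equality_sets are the eq members found in?
--         sets_found_in = []
--         for eq_set in equality_sets:
--             # if there is an intersection (i.e. any member of the current_eq is in the new_set)
--             if current_eq.intersection(eq_set):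
--                 # append eq_set to the list of sets the
--                 sets_found_in.append(eq_set)
--                 # and therefore we don't need to create a new set because we found a candidate group
--                 need_new = False
--
--         # if need_new is True, start a new group
--         if need_new:
--             equality_sets.append(set(current_eq))
--         # else, unionize all sets it was found in and pop extras from equality_sets
--         else:
--             updated_equality_set = set()
--             # update the set
--             for s in sets_found_in:
--                 updated_equality_set.update(s)
--                 equality_sets.remove(s)
--             updated_equality_set.update(current_eq)
--             equality_sets.append(updated_equality_set)
--
--     return equality_sets
-- ===== SOURCE B (Python) =====
-- def group_equalities(equalities):
--     # Hash-indexed grouping: a var->group-id map finds the affected groups by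
--     # direct lookup, so no set intersections with existing groups are computed.
--     index = {}   # variable -> id of the group currently containing it
--     table = {}   # group id -> set of variables (stale ids are simply never read)
--     order = []   # live group ids, in output order
--     next_id = 0
--     for eq in reversed(equalities):
--         cur = set(eq)
--         touched = {index[v] for v in cur if v in index}
--         if touched:
--             merged = set()
--             new_order = []
--             for i in order:
--                 if i in touched:
--                     merged |= table[i]
--                 else:
--                     new_order.append(i)
--             merged |= cur
--             order = new_order
--         else:
--             merged = set(cur)
--         gid = next_id
--         next_id += 1
--         order.append(gid)
--         table[gid] = merged
--         for v in merged:
--             index[v] = gid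
--     return [table[i] for i in order]
-- ===== Notes on version B (the rewrite author's own statement) =====
-- stated objective: alternative
-- what changed: B keeps a var->group-id hash index and an id->set table, finding the groups affected by each equality via O(|eq|) dictionary lookups instead of A's set-intersection scan over every existing group, and relabels the merged members; the output order is kept by a list of live group ids.
import Mathlib
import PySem

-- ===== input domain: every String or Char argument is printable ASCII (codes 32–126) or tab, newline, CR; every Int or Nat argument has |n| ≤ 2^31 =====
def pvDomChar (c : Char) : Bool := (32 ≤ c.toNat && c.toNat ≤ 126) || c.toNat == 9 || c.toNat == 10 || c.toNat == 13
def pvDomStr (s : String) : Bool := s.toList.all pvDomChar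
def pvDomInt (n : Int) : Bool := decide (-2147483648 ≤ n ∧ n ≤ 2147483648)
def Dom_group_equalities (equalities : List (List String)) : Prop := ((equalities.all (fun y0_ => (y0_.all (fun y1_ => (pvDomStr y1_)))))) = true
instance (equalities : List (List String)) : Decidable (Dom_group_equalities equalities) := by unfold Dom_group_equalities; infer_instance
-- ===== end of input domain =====

-- B replaces A's per-equality intersection scan over all existing groups by a
-- variable -> group-id hash index: affected groups are found by direct lookups
-- (objective: alternative data structure; no set intersections are computed).

-- ===== PORT A =====
-- one iteration of A's while-loop body, for the popped equality `eq`
def aStep (acc : List (List String)) (eq : List String) : List (List String) :=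
  let cur : PySem.Set String := PySem.Set.ofList eq
  -- inner for-loop: need_new flag and sets_found_in accumulated together
  let st := acc.foldl
    (fun (st : Bool × List (List String)) eqSet =>
      if (PySem.Set.inter cur eqSet).isEmpty then st else (false, st.2 ++ [eqSet]))
    (true, [])
  if st.1 then
    acc ++ [cur]
  else
    -- for s in sets_found_in: updated.update(s); equality_sets.remove(s)
    -- (list.remove never raises here: each s is still present; .getD covers the unreachable none)
    let fin := st.2.foldl
      (fun (q : List String × List (List String)) s =>
        (PySem.Set.update q.1 s, (PySem.List.remove? q.2 s).getD q.2))
      (PySem.Set.empty, acc)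
    fin.2 ++ [PySem.Set.update fin.1 cur]

-- `while eqs: current_eq = eqs.pop(); …` consumes the copied list from its END:
-- recurse over the reversed list
def aLoop (acc : List (List String)) : List (List String) → List (List String)
  | [] => acc
  | eq :: rest => aLoop (aStep acc eq) rest

def group_equalities (equalities : List (List String)) : List (List String) :=
  aLoop [] equalities.reverse

-- ===== PORT B =====
-- B's loop state: index = var -> group id, table = group id -> set, order = live ids
structure BSt where
  index : PySem.Dict String Int
  table : PySem.Dict Int (List String)
  order : List Int
  nextId : Int
deriving Repr

-- touched = {index[v] for v in cur if v in index} (only membership in it is used)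
def bTouched (index : PySem.Dict String Int) (cur : List String) : PySem.Set Int :=
  cur.foldl (fun t v =>
    match index.get? v with
    | some i => PySem.Set.add t i
    | none => t) PySem.Set.empty

-- one iteration of B's for-loop (Python's `if touched: … else: …` with the
-- branches written no-touch-first)
def bStep (st : BSt) (eq : List String) : BSt :=
  let cur : PySem.Set String := PySem.Set.ofList eq
  let touched := bTouched st.index cur
  let mo : List String × List Int :=
    if touched.isEmpty then
      (cur, st.order)
    else
      -- for i in order: merge table[i] into merged, or keep i in new_order
      let p := st.order.foldl
        (fun (q : List String × List Int) i =>
          if PySem.Set.contains touched i then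
            (PySem.Set.update q.1 (st.table.getD i []), q.2)
          else
            (q.1, q.2 ++ [i]))
        (PySem.Set.empty, [])
      (PySem.Set.update p.1 cur, p.2)
  let gid := st.nextId
  { index := mo.1.foldl (fun d v => d.insert v gid) st.index
    table := st.table.insert gid mo.1
    order := mo.2 ++ [gid]
    nextId := gid + 1 }

def group_equalities_alt (equalities : List (List String)) : List (List String) :=
  let fin := equalities.reverse.foldl bStep ⟨PySem.Dict.empty, PySem.Dict.empty, [], 0⟩
  -- table[i] always succeeds for i in order; .getD covers the unreachable default
  fin.order.map (fun i => fin.table.getD i [])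

-- ===== PRECONDITION & SPEC =====
def Spec_group_equalities (equalities : List (List String)) (out : List (List String)) : Prop := out = group_equalities_alt equalities
instance (equalities : List (List String)) (out : List (List String)) : Decidable (Spec_group_equalities equalities out) := by unfold Spec_group_equalities; infer_instance

-- ===== CLAIM (what is proved, stated in full; the proofs are below) =====
def Claim_equal_group_equalities : Prop := ∀ (equalities : List (List String)), Dom_group_equalities equalities → Spec_group_equalities equalities (group_equalities equalities)

-- ===== LEMMAS AND PROOFS =====

-- the common "one equality processed" shape both ports are reduced to:
-- keep the disjoint groups, append the union of the overlapping groups and cur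
def partStep (gs : List (List String)) (eq : List String) : List (List String) :=
  let cur : PySem.Set String := PySem.Set.ofList eq
  gs.filter (fun g => (PySem.Set.inter cur g).isEmpty)
    ++ [PySem.Set.update
          ((gs.filter (fun g => !(PySem.Set.inter cur g).isEmpty)).foldl
            (fun m g => PySem.Set.update m g) PySem.Set.empty) cur]

-- ---------- A-side: aStep = partStep ----------

-- A's inner for-loop computes the need_new flag and sets_found_in; characterised as all/filter
theorem aFlag_fold (cur : List String) (acc : List (List String)) (b : Bool)
    (l : List (List String)) :
    acc.foldl
      (fun (st : Bool × List (List String)) eqSet =>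
        if (PySem.Set.inter cur eqSet).isEmpty then st else (false, st.2 ++ [eqSet]))
      (b, l)
    = (b && acc.all (fun g => (PySem.Set.inter cur g).isEmpty),
       l ++ acc.filter (fun g => !(PySem.Set.inter cur g).isEmpty)) := by
  induction acc generalizing b l with
  | nil => simp
  | cons a rest ih =>
    rw [List.foldl_cons]
    by_cases h : (PySem.Set.inter cur a).isEmpty
    · rw [if_pos h, ih]
      simp [List.all_cons, h]
    · rw [if_neg h, ih]
      simp [List.all_cons, h]

-- prepending an element none of the removed values equals commutes with the remove-fold
theorem remove_fold_cons {α : Type} [BEq α] [LawfulBEq α] (a : α) (ws : List α)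
    (hne : ∀ w ∈ ws, w ≠ a) :
    ∀ l : List α,
      ws.foldl (fun t s => (PySem.List.remove? t s).getD t) (a :: l)
      = a :: ws.foldl (fun t s => (PySem.List.remove? t s).getD t) l := by
  induction ws with
  | nil => intro l; simp
  | cons w ws ih =>
    intro l
    have hwa : a ≠ w := fun h => hne w (by simp) h.symm
    have : (PySem.List.remove? (a :: l) w).getD (a :: l)
        = a :: (PySem.List.remove? l w).getD l := by
      rw [PySem.List.remove?_cons_of_ne l hwa]
      cases PySem.List.remove? l w <;> simp
    simp only [List.foldl_cons, this]
    exact ih (fun x hx => hne x (by simp [hx])) _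

-- sequentially list.remove-ing every p-element of l from l leaves exactly the non-p elements
theorem remove_fold_filter {α : Type} [BEq α] [LawfulBEq α] (p : α → Bool) (l : List α) :
    (l.filter p).foldl (fun t s => (PySem.List.remove? t s).getD t) l
    = l.filter (fun x => !p x) := by
  induction l with
  | nil => simp
  | cons a l ih =>
    by_cases h : p a
    · rw [List.filter_cons_of_pos h, List.filter_cons_of_neg (by simp [h]),
        List.foldl_cons, PySem.List.remove?_cons_self, Option.getD_some, ih]
    · have hne : ∀ w ∈ l.filter p, w ≠ a := by
        intro w hw hwa
        exact h (hwa ▸ (List.of_mem_filter hw))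
      rw [List.filter_cons_of_neg (by simp [h]), List.filter_cons_of_pos (by simp [h]),
        remove_fold_cons a _ hne l, ih]

-- the merge-accumulator pair: Set.update part and remove part computed separately
theorem pair_fold (ws : List (List String)) (u : List String) (t : List (List String)) :
    ws.foldl
      (fun (q : List String × List (List String)) s =>
        (PySem.Set.update q.1 s, (PySem.List.remove? q.2 s).getD q.2))
      (u, t)
    = (ws.foldl (fun m g => PySem.Set.update m g) u,
       ws.foldl (fun t' s => (PySem.List.remove? t' s).getD t') t) := by
  induction ws generalizing u t with
  | nil => rfl
  | cons w ws ih => simp [List.foldl_cons, ih]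

theorem aStep_eq_partStep (acc : List (List String)) (eq : List String) :
    aStep acc eq = partStep acc eq := by
  unfold aStep partStep
  simp only [aFlag_fold, Bool.true_and, pair_fold]
  by_cases hall : acc.all (fun g => (PySem.Set.inter (PySem.Set.ofList eq) g).isEmpty)
  · have hfil : acc.filter (fun g => !(PySem.Set.inter (PySem.Set.ofList eq) g).isEmpty) = [] := by
      rw [List.filter_eq_nil_iff]
      intro g hg
      simp [List.all_eq_true.mp hall g hg]
    have hkeep : acc.filter (fun g => (PySem.Set.inter (PySem.Set.ofList eq) g).isEmpty) = acc :=
      List.filter_eq_self.mpr (List.all_eq_true.mp hall)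
    simp [hall, hfil, hkeep, PySem.Set.update_nil_left, PySem.Set.ofList_ofList]
  · simp only [hall, Bool.false_eq_true, if_false, List.nil_append]
    rw [remove_fold_filter (fun g => !(PySem.Set.inter (PySem.Set.ofList eq) g).isEmpty) acc]
    simp

theorem aLoop_eq (l acc : List (List String)) :
    aLoop acc l = l.foldl partStep acc := by
  induction l generalizing acc with
  | nil => rfl
  | cons eq rest ih => rw [aLoop, aStep_eq_partStep, ih, List.foldl_cons]

-- ---------- generic small lemmas ----------

-- membership in the bTouched fold
theorem mem_bTouched (idx : PySem.Dict String Int) (cur : List String) (i : Int) :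
    i ∈ bTouched idx cur ↔ ∃ v ∈ cur, idx.get? v = some i := by
  unfold bTouched
  suffices h : ∀ (t : PySem.Set Int),
      i ∈ cur.foldl (fun t v =>
        match idx.get? v with
        | some j => PySem.Set.add t j
        | none => t) t ↔ i ∈ t ∨ ∃ v ∈ cur, idx.get? v = some i by
    simpa using h PySem.Set.empty
  induction cur with
  | nil => simp
  | cons v cur ih =>
    intro t
    rw [List.foldl_cons]
    cases hv : idx.get? v with
    | none =>
      simp only [ih, List.mem_cons]
      constructor
      · rintro (h | ⟨w, hw, hwi⟩)
        · exact Or.inl h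
        · exact Or.inr ⟨w, Or.inr hw, hwi⟩
      · rintro (h | ⟨w, (rfl | hw), hwi⟩)
        · exact Or.inl h
        · rw [hv] at hwi; cases hwi
        · exact Or.inr ⟨w, hw, hwi⟩
    | some j =>
      simp only [ih, PySem.Set.mem_add, List.mem_cons]
      constructor
      · rintro (⟨h | rfl⟩ | ⟨w, hw, hwi⟩)
        · exact Or.inl h
        · exact Or.inr ⟨v, Or.inl rfl, hv⟩
        · exact Or.inr ⟨w, Or.inr hw, hwi⟩
      · rintro (h | ⟨w, (rfl | hw), hwi⟩)
        · exact Or.inl (Or.inl h)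
        · rw [hv] at hwi; exact Or.inl (Or.inr (Option.some_inj.mp hwi).symm)
        · exact Or.inr ⟨w, hw, hwi⟩

-- an insert-loop with a constant value: lookup afterwards
theorem get?_idxFold (gid : Int) (l : List String) (d : PySem.Dict String Int) (v : String) :
    (l.foldl (fun d x => d.insert x gid) d).get? v
      = if v ∈ l then some gid else d.get? v := by
  induction l generalizing d with
  | nil => simp
  | cons x l ih =>
    rw [List.foldl_cons, ih]
    by_cases hvl : v ∈ l
    · simp [hvl]
    · by_cases hvx : v = x
      · subst hvx; simp [hvl, PySem.Dict.get?_insert_self]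
      · simp [hvl, hvx, PySem.Dict.get?_insert_of_ne _ _ hvx]

-- membership in the union-of-groups fold
theorem mem_mergeFold (f : Int → List String) (l : List Int) (m : List String) (v : String) :
    v ∈ l.foldl (fun m i => PySem.Set.update m (f i)) m ↔ v ∈ m ∨ ∃ i ∈ l, v ∈ f i := by
  induction l generalizing m with
  | nil => simp
  | cons i l ih =>
    rw [List.foldl_cons, ih]
    simp only [PySem.Set.mem_update, List.mem_cons]
    constructor
    · rintro (⟨h | h⟩ | ⟨j, hj, hv⟩)
      · exact Or.inl h
      · exact Or.inr ⟨i, Or.inl rfl, h⟩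
      · exact Or.inr ⟨j, Or.inr hj, hv⟩
    · rintro (h | ⟨j, (rfl | hj), hv⟩)
      · exact Or.inl (Or.inl h)
      · exact Or.inl (Or.inr hv)
      · exact Or.inr ⟨j, hj, hv⟩

-- B's inner for-loop, split into its two independent accumulators
theorem bFold_split (p : Int → Bool) (f : Int → List String) (ord : List Int)
    (m : List String) (no : List Int) :
    ord.foldl
      (fun (q : List String × List Int) i =>
        if p i then (PySem.Set.update q.1 (f i), q.2) else (q.1, q.2 ++ [i]))
      (m, no)
    = ((ord.filter p).foldl (fun m i => PySem.Set.update m (f i)) m,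
       no ++ ord.filter (fun i => !p i)) := by
  induction ord generalizing m no with
  | nil => simp
  | cons i ord ih =>
    rw [List.foldl_cons]
    by_cases h : p i
    · rw [if_pos h, ih]
      simp [h]
    · rw [if_neg h, ih]
      simp [h]

-- a set intersection is nonempty iff the two have a common member
theorem inter_not_isEmpty_iff (s t : List String) :
    (!(PySem.Set.inter s t).isEmpty) = true ↔ ∃ v ∈ s, v ∈ t := by
  rw [Bool.not_eq_true', List.isEmpty_eq_false_iff_exists_mem]
  constructor
  · rintro ⟨v, hv⟩
    rw [PySem.Set.mem_inter] at hv
    exact ⟨v, hv.1, hv.2⟩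
  · rintro ⟨v, hs, ht⟩
    exact ⟨v, (PySem.Set.mem_inter _ _ _).mpr ⟨hs, ht⟩⟩

-- ---------- B-side invariant ----------

def GInv (st : BSt) (gs : List (List String)) : Prop :=
  gs = st.order.map (fun i => st.table.getD i []) ∧
  st.order.Nodup ∧
  (∀ i ∈ st.order, i < st.nextId) ∧
  (∀ i ∈ st.order, ∀ v ∈ st.table.getD i [], st.index.get? v = some i) ∧
  (∀ v i, st.index.get? v = some i → i ∈ st.order ∧ v ∈ st.table.getD i [])

-- proof-side names for the three quantities of one B step
def touchedOf (st : BSt) (eq : List String) : PySem.Set Int :=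
  bTouched st.index (PySem.Set.ofList eq)

def keptOf (st : BSt) (eq : List String) : List Int :=
  st.order.filter (fun i => !PySem.Set.contains (touchedOf st eq) i)

def mergedOf (st : BSt) (eq : List String) : List String :=
  PySem.Set.update
    ((st.order.filter (fun i => PySem.Set.contains (touchedOf st eq) i)).foldl
      (fun m i => PySem.Set.update m (st.table.getD i [])) PySem.Set.empty)
    (PySem.Set.ofList eq)

-- bStep written with those names (the isEmpty branch is the degenerate case)
theorem bStep_eq (st : BSt) (eq : List String) :
    bStep st eq =
      ⟨(mergedOf st eq).foldl (fun d v => d.insert v st.nextId) st.index,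
       st.table.insert st.nextId (mergedOf st eq),
       keptOf st eq ++ [st.nextId],
       st.nextId + 1⟩ := by
  simp only [bStep, mergedOf, keptOf, touchedOf]
  by_cases hE : (bTouched st.index (PySem.Set.ofList eq)).isEmpty
  · have hnil : bTouched st.index (PySem.Set.ofList eq) = [] := by
      simpa using hE
    rw [if_pos hE]
    simp [hnil, PySem.Set.contains, PySem.Set.update_nil_left, PySem.Set.ofList_ofList]
  · rw [if_neg hE, bFold_split]
    rfl

theorem bStep_inv (st : BSt) (gs : List (List String)) (eq : List String)
    (h : GInv st gs) : GInv (bStep st eq) (partStep gs eq) := by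
  obtain ⟨hgs, hnd, hlt, hfwd, hbwd⟩ := h
  rw [bStep_eq]
  -- pointwise: a group overlaps cur iff its id is touched
  have hpt : ∀ i ∈ st.order,
      (!(PySem.Set.inter (PySem.Set.ofList eq) (st.table.getD i [])).isEmpty)
        = PySem.Set.contains (touchedOf st eq) i := by
    intro i hi
    rw [Bool.eq_iff_iff, inter_not_isEmpty_iff, PySem.Set.contains_iff]
    unfold touchedOf
    rw [mem_bTouched]
    constructor
    · rintro ⟨v, hvc, hvg⟩
      exact ⟨v, hvc, hfwd i hi v hvg⟩
    · rintro ⟨v, hvc, hvi⟩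
      exact ⟨v, hvc, (hbwd v i hvi).2⟩
  -- partStep in terms of the id lists
  have hfilter1 : gs.filter (fun g => (PySem.Set.inter (PySem.Set.ofList eq) g).isEmpty)
      = (keptOf st eq).map (fun i => st.table.getD i []) := by
    rw [hgs, List.filter_map]
    unfold keptOf
    congr 1
    apply List.filter_congr
    intro i hi
    have := hpt i hi
    simp only [Function.comp]
    cases hc : PySem.Set.contains (touchedOf st eq) i <;> simp_all
  have hfilter2 : gs.filter (fun g => !(PySem.Set.inter (PySem.Set.ofList eq) g).isEmpty)
      = (st.order.filter (fun i => PySem.Set.contains (touchedOf st eq) i)).map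
          (fun i => st.table.getD i []) := by
    rw [hgs, List.filter_map]
    congr 1
    apply List.filter_congr
    intro i hi
    simp only [Function.comp]
    exact hpt i hi
  have hpart : partStep gs eq
      = (keptOf st eq).map (fun i => st.table.getD i []) ++ [mergedOf st eq] := by
    simp only [partStep]
    rw [hfilter1, hfilter2]
    unfold mergedOf
    rw [List.foldl_map]
  -- membership in the merged group
  have hmm : ∀ v, v ∈ mergedOf st eq ↔ v ∈ eq ∨
      ∃ i ∈ st.order, PySem.Set.contains (touchedOf st eq) i = true ∧ v ∈ st.table.getD i [] := by
    intro v
    unfold mergedOf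
    rw [PySem.Set.mem_update, mem_mergeFold]
    simp [List.mem_filter, PySem.Set.mem_ofList, and_assoc]
    exact Or.comm
  have hkept_mem : ∀ i ∈ keptOf st eq,
      i ∈ st.order ∧ PySem.Set.contains (touchedOf st eq) i = false := by
    intro i hi
    rw [keptOf, List.mem_filter] at hi
    exact ⟨hi.1, by simpa using hi.2⟩
  have hne_gid : ∀ i ∈ keptOf st eq, i ≠ st.nextId := by
    intro i hi
    have := hlt i (hkept_mem i hi).1
    omega
  unfold GInv
  dsimp only
  rw [hpart]
  refine ⟨?_, ?_, ?_, ?_, ?_⟩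
  · -- (1) groups list matches
    simp only [List.map_append, List.map_cons, List.map_nil]
    congr 1
    · apply List.map_congr_left
      intro i hi
      exact (PySem.Dict.getD_insert_of_ne _ _ _ (hne_gid i hi)).symm
    · rw [PySem.Dict.getD_insert_self]
  · -- (2) Nodup
    rw [List.nodup_append]
    refine ⟨hnd.filter _, List.nodup_singleton _, ?_⟩
    intro i hi j hj
    have : j = st.nextId := by simpa using hj
    subst this
    exact hne_gid i hi
  · -- (3) bound
    intro i hi
    rcases List.mem_append.mp hi with hk | hg
    · have := hlt i (hkept_mem i hk).1
      omega
    · have : i = st.nextId := by simpa using hg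
      omega
  · -- (4) index is correct on every group member
    intro i hi v hv
    rcases List.mem_append.mp hi with hk | hg
    · -- i kept: its group is untouched, v not in merged
      rw [PySem.Dict.getD_insert_of_ne _ _ _ (hne_gid i hk)] at hv
      have hio := (hkept_mem i hk).1
      have hvm : v ∉ mergedOf st eq := by
        intro hvmm
        rcases (hmm v).mp hvmm with hveq | ⟨j, hj, hqj, hvj⟩
        · -- v ∈ eq would make i touched
          have hit : i ∈ touchedOf st eq := by
            unfold touchedOf
            rw [mem_bTouched]
            exact ⟨v, by simpa [PySem.Set.mem_ofList] using hveq, hfwd i hio v hv⟩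
          have hct : PySem.Set.contains (touchedOf st eq) i = true := by
            rw [PySem.Set.contains_iff]; exact hit
          rw [(hkept_mem i hk).2] at hct
          cases hct
        · -- v in a touched group j would force i = j touched
          have hij : i = j := by
            have h1 := hfwd i hio v hv
            have h2 := hfwd j hj v hvj
            rw [h1] at h2
            exact (Option.some_inj.mp h2)
          rw [← hij, (hkept_mem i hk).2] at hqj
          cases hqj
      rw [get?_idxFold, if_neg hvm]
      exact hfwd i hio v hv
    · -- i = gid
      have : i = st.nextId := by simpa using hg
      subst this
      rw [PySem.Dict.getD_insert_self] at hv
      rw [get?_idxFold, if_pos hv]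
  · -- (5) every index entry points into its group
    intro v i hvi
    rw [get?_idxFold] at hvi
    by_cases hvm : v ∈ mergedOf st eq
    · rw [if_pos hvm] at hvi
      have : i = st.nextId := Option.some_inj.mp hvi.symm
      subst this
      refine ⟨by simp, ?_⟩
      rw [PySem.Dict.getD_insert_self]
      exact hvm
    · rw [if_neg hvm] at hvi
      obtain ⟨hio, hvg⟩ := hbwd v i hvi
      have hqi : PySem.Set.contains (touchedOf st eq) i = false := by
        cases hq : PySem.Set.contains (touchedOf st eq) i
        · rfl
        · exact absurd ((hmm v).mpr (Or.inr ⟨i, hio, hq, hvg⟩)) hvm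
      have hik : i ∈ keptOf st eq := by
        rw [keptOf, List.mem_filter]
        exact ⟨hio, by simp only [hqi, Bool.not_false]⟩
      refine ⟨List.mem_append.mpr (Or.inl hik), ?_⟩
      rw [PySem.Dict.getD_insert_of_ne _ _ _ (hne_gid i hik)]
      exact hvg

theorem bLoop_inv (l : List (List String)) (st : BSt) (gs : List (List String))
    (h : GInv st gs) : GInv (l.foldl bStep st) (l.foldl partStep gs) := by
  induction l generalizing st gs with
  | nil => exact h
  | cons eq l ih => exact ih _ _ (bStep_inv st gs eq h)

-- ===== VERDICT (by name: the statement is the Claim_ definition above) =====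
theorem group_equalities_spec : Claim_equal_group_equalities := by
  intro equalities _
  unfold Spec_group_equalities group_equalities group_equalities_alt
  rw [aLoop_eq]
  have h := bLoop_inv equalities.reverse ⟨PySem.Dict.empty, PySem.Dict.empty, [], 0⟩ []
    (by refine ⟨rfl, List.nodup_nil, ?_, ?_, ?_⟩ <;> simp [PySem.Dict.get?_empty])
  exact h.1
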